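-- pv_equiv track=rewrite | github.com/tjgao/basic_algo | comb_perm.py | subset_iter
-- ===== SOURCE A (Python) =====
-- def subset_iter(lst):
--     res = [[]]
--     for i in lst:
--         sz = len(res)
--         for j in range(sz):
--             l = list(res[j])
--             l.append(i)
--             res.append(l)
--     return res
-- ===== SOURCE B (Python) =====
-- def subset_iter(lst):
--     lst = list(lst)
--     n = len(lst)
--     return [[lst[k] for k in range(n) if (m >> k) & 1] for m in range(1 << n)]
-- ===== Notes on version B (the rewrite author's own statement) =====
-- stated objective: alternative
-- what changed: Replaces the in-place doubling loop (appending a copy of each earlier subset per element) with a direct bitmask enumeration: subset m is built from the bits of m, reproducing A's exact order.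
import Mathlib
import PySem

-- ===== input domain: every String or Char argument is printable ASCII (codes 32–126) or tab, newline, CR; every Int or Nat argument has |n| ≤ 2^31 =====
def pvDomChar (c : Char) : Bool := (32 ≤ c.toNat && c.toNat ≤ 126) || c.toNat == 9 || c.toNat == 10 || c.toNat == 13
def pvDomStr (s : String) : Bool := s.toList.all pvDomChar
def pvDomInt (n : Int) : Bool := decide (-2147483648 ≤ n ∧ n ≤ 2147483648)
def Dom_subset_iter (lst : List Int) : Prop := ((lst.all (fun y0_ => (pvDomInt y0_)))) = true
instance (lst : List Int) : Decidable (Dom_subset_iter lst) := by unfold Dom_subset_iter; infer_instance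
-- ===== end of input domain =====

-- B replaces A's in-place doubling loop by a direct bitmask enumeration (alternative algorithm, same order).

-- ===== PORT A =====
-- Python A: res = [[]]; for i in lst: sz = len(res); for j in range(sz): res.append(list(res[j]) + [i]).
-- The inner loop reads indices j < sz while appending at the end, so each read index is in range;
-- getD with default [] is exact here (never hits the default).
def subset_iter (lst : List Int) : List (List Int) :=
  lst.foldl
    (fun res i =>
      (List.range res.length).foldl (fun r j => r ++ [r.getD j [] ++ [i]]) res)
    [[]]

-- ===== PORT B =====
-- Python B: [[lst[k] for k in range(n) if (m >> k) & 1] for m in range(1 << n)];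
-- (m >> k) & 1 == 1 is Nat.testBit m k; lst[k] with k < n is getD k 0 (exact, never the default).
def subset_iter_alt (lst : List Int) : List (List Int) :=
  (List.range (2 ^ lst.length)).map (fun m =>
    (List.range lst.length).filterMap (fun k =>
      if Nat.testBit m k then some (lst.getD k 0) else none))

-- ===== PRECONDITION & SPEC =====
def Spec_subset_iter (lst : List Int) (out : List (List Int)) : Prop := out = subset_iter_alt lst
instance (lst : List Int) (out : List (List Int)) : Decidable (Spec_subset_iter lst out) := by unfold Spec_subset_iter; infer_instance

-- ===== CLAIM (what is proved, stated in full; the proofs are below) =====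
def Claim_equal_subset_iter : Prop := ∀ (lst : List Int), Dom_subset_iter lst → Spec_subset_iter lst (subset_iter lst)

-- ===== LEMMAS AND PROOFS =====

-- A's inner loop, generalized: folding over indices [a, a+k) of `res` starting from state res ++ ext
-- appends exactly (res.drop a).map (· ++ [i]).
theorem inner_loop_eq (i : Int) : ∀ (k a : Nat) (res ext : List (List Int)), a + k = res.length →
    (List.range' a k).foldl (fun r j => r ++ [r.getD j [] ++ [i]]) (res ++ ext)
      = res ++ ext ++ (res.drop a).map (· ++ [i]) := by
  intro k
  induction k with
  | zero =>
    intro a res ext h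
    simp at h
    simp [h, List.drop_length]
  | succ k ih =>
    intro a res ext h
    have ha : a < res.length := by omega
    rw [List.range'_succ, List.foldl_cons]
    have hget : (res ++ ext).getD a [] = res[a] := by
      rw [List.getD_append _ _ _ _ ha, List.getD_eq_getElem _ _ ha]
    rw [hget]
    have : res ++ ext ++ [res[a] ++ [i]] = res ++ (ext ++ [res[a] ++ [i]]) := by
      simp
    rw [this, ih (a + 1) res (ext ++ [res[a] ++ [i]]) (by omega)]
    have hdrop : res.drop a = res[a] :: res.drop (a + 1) := List.drop_eq_getElem_cons ha
    rw [hdrop, List.map_cons]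
    simp

theorem step_eq (res : List (List Int)) (i : Int) :
    (List.range res.length).foldl (fun r j => r ++ [r.getD j [] ++ [i]]) res
      = res ++ res.map (· ++ [i]) := by
  have := inner_loop_eq i res.length 0 res [] (by omega)
  simpa [List.range_eq_range'] using this

-- B's row builder.
def pvRow (lst : List Int) (m : Nat) : List Int :=
  (List.range lst.length).filterMap (fun k =>
    if Nat.testBit m k then some (lst.getD k 0) else none)

theorem subset_iter_alt_def (lst : List Int) :
    subset_iter_alt lst = (List.range (2 ^ lst.length)).map (pvRow lst) := rfl

theorem pvTestBit_high (n m : Nat) (h : m < 2 ^ n) : Nat.testBit (2 ^ n + m) n = true := by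
  rw [Nat.testBit_eq_decide_div_mod_eq, Nat.add_comm, Nat.add_div_right _ (Nat.two_pow_pos n),
    Nat.div_eq_of_lt h]
  decide

theorem pvTestBit_low (n m k : Nat) (hk : k < n) :
    Nat.testBit (2 ^ n + m) k = Nat.testBit m k := by
  rw [Nat.testBit_eq_decide_div_mod_eq, Nat.testBit_eq_decide_div_mod_eq]
  have h2 : 2 ^ n + m = 2 ^ k * (2 * 2 ^ (n - k - 1)) + m := by
    congr 1
    rw [← mul_assoc, show 2 ^ k * 2 = 2 ^ (k + 1) from (pow_succ 2 k).symm, ← pow_add]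
    congr 1
    omega
  rw [h2, Nat.mul_add_div (Nat.two_pow_pos k), Nat.mul_add_mod]

theorem pvRow_append_low (ys : List Int) (x : Int) (m : Nat) (hm : m < 2 ^ ys.length) :
    pvRow (ys ++ [x]) m = pvRow ys m := by
  unfold pvRow
  simp only [List.length_append, List.length_cons, List.length_nil]
  rw [show ys.length + 1 = ys.length + 1 from rfl, List.range_succ, List.filterMap_append]
  have hbit : Nat.testBit m ys.length = false := Nat.testBit_lt_two_pow hm
  simp only [List.filterMap_cons, List.filterMap_nil, hbit, if_neg Bool.false_ne_true]
  rw [List.append_nil]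
  apply List.filterMap_congr
  intro k hk
  have hk' : k < ys.length := List.mem_range.mp hk
  rw [List.getD_append _ _ _ _ hk']

theorem pvRow_append_high (ys : List Int) (x : Int) (m : Nat) (hm : m < 2 ^ ys.length) :
    pvRow (ys ++ [x]) (2 ^ ys.length + m) = pvRow ys m ++ [x] := by
  unfold pvRow
  simp only [List.length_append, List.length_cons, List.length_nil]
  rw [List.range_succ, List.filterMap_append]
  have hbit : Nat.testBit (2 ^ ys.length + m) ys.length = true := pvTestBit_high ys.length m hm
  have hgd : (ys ++ [x]).getD ys.length 0 = x := by
    simp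
  simp only [List.filterMap_cons, List.filterMap_nil, hbit, hgd]
  congr 1
  apply List.filterMap_congr
  intro k hk
  have hk' : k < ys.length := List.mem_range.mp hk
  rw [pvTestBit_low ys.length m k hk', List.getD_append _ _ _ _ hk']

theorem alt_concat (ys : List Int) (x : Int) :
    subset_iter_alt (ys ++ [x]) = subset_iter_alt ys ++ (subset_iter_alt ys).map (· ++ [x]) := by
  rw [subset_iter_alt_def, subset_iter_alt_def]
  have hlen : (ys ++ [x]).length = ys.length + 1 := by simp
  have hp : 2 ^ (ys.length + 1) = 2 ^ ys.length + 2 ^ ys.length := by ring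
  rw [hlen, hp, List.range_add, List.map_append, List.map_map]
  congr 1
  · apply List.map_congr_left
    intro m hm
    exact pvRow_append_low ys x m (List.mem_range.mp hm)
  · rw [List.map_map]
    apply List.map_congr_left
    intro m hm
    exact pvRow_append_high ys x m (List.mem_range.mp hm)

theorem main_eq (lst : List Int) : subset_iter lst = subset_iter_alt lst := by
  induction lst using List.reverseRecOn with
  | nil => decide
  | append_singleton ys x ih =>
    unfold subset_iter
    rw [List.foldl_append]
    have : List.foldl (fun res i => (List.range res.length).foldl (fun r j => r ++ [r.getD j [] ++ [i]]) res) [[]] ys = subset_iter ys := rfl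
    rw [this, ih]
    simp only [List.foldl_cons, List.foldl_nil]
    rw [step_eq, alt_concat]

-- ===== VERDICT (by name: the statement is the Claim_ definition above) =====
theorem subset_iter_spec : Claim_equal_subset_iter := by
  intro lst _
  unfold Spec_subset_iter
  exact main_eq lst
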